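-- pv_equiv track=rewrite | github.com/Keymorek/frappe_docker_ra | custom_apps/fashion_erp/fashion_erp/patches/v1_3/add_sales_order_external_order_index.py | _has_target_index
-- ===== SOURCE A (Python) =====
-- def _has_target_index(rows, index_name: str, fields: tuple[str, ...]) -> bool:
--     grouped: dict[str, dict[int, str]] = {}
--     for row in rows or []:
--         key_name = str(row.get("Key_name") or "")
--         seq = int(row.get("Seq_in_index") or 0)
--         column_name = str(row.get("Column_name") or "")
--         if not key_name or not seq or not column_name:
--             continue
--         grouped.setdefault(key_name, {})[seq] = column_name
--
--     for key_name, columns in grouped.items():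
--         ordered = tuple(columns[index] for index in sorted(columns))
--         if key_name == index_name and ordered == fields:
--             return True
--     return False
-- ===== SOURCE B (Python) =====
-- def _has_target_index(rows, index_name: str, fields: tuple[str, ...]) -> bool:
--     # Reverse scan: keep the LAST write for each sequence number of the target
--     # index only (first hit in the reversed order), then sort once and compare.
--     pairs: list[tuple[int, str]] = []
--     seen: set[int] = set()
--     for row in reversed(list(rows or [])):
--         key = str(row.get("Key_name") or "")
--         seq = int(row.get("Seq_in_index") or 0)
--         col = str(row.get("Column_name") or "")
--         if key and seq and col and key == index_name and seq not in seen: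
--             seen.add(seq)
--             pairs.append((seq, col))
--     if not pairs:
--         return False
--     pairs.sort(key=lambda kv: kv[0])
--     return tuple(col for _, col in pairs) == fields
-- ===== Notes on version B (the rewrite author's own statement) =====
-- stated objective: alternative
-- what changed: B replaces A's dict-of-dicts grouping over all key names plus a second pass over every group by a single reverse scan that keeps, via a seen-set, the last-written (seq, column) pair for the target index only, then sorts that one pair list and compares.
import Mathlib
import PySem

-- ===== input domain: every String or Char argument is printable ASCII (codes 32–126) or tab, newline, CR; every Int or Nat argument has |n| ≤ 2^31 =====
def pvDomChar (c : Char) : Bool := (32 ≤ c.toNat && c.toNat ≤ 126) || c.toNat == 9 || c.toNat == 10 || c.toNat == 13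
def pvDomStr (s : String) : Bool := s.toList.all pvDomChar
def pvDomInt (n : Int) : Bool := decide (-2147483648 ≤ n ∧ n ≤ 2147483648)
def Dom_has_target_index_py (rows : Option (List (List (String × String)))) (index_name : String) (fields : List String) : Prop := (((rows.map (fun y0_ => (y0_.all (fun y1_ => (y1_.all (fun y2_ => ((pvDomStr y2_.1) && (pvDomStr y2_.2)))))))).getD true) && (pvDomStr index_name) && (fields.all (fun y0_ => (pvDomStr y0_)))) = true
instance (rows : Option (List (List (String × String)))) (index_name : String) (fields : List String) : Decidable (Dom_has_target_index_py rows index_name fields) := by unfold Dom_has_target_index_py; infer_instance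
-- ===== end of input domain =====

-- B replaces A's dict-of-dicts grouping over all key names + second pass over groups by a single
-- reverse scan keeping only the target index's last-written (seq, column) pairs (objective: alternative).

-- `row.get(k) or ""` on a string-valued dict row (assoc list, first match); exact.
def pyGetOr (row : List (String × String)) (k : String) : String :=
  ((row.find? (fun p => p.1 == k)).map (·.2)).getD ""

-- `int(row.get("Seq_in_index") or 0)`; the `.getD 0` branch is unreachable under Pre_ (int() raises there).
def seqOf (row : List (String × String)) : Int :=
  if pyGetOr row "Seq_in_index" = "" then 0 else (PySem.Int.ofStr? (pyGetOr row "Seq_in_index")).getD 0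

-- ===== PORT A =====
-- loop body: `grouped.setdefault(key_name, {})[seq] = column_name` is Dict.modify key {} (insert seq col)
def hasA_step (g : PySem.Dict String (PySem.Dict Int String)) (row : List (String × String)) :
    PySem.Dict String (PySem.Dict Int String) :=
  if pyGetOr row "Key_name" = "" ∨ seqOf row = 0 ∨ pyGetOr row "Column_name" = "" then g
  else g.modify (pyGetOr row "Key_name") PySem.Dict.empty (fun m => m.insert (seqOf row) (pyGetOr row "Column_name"))

def has_target_index_py (rows : Option (List (List (String × String)))) (index_name : String) (fields : List String) : Bool :=
  let grouped := (rows.getD []).foldl hasA_step PySem.Dict.empty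
  grouped.items.any (fun p =>
    -- `columns[index]`: getD "" is exact here, the index is drawn from columns' own keys
    p.1 == index_name && ((PySem.List.sorted p.2.keys (fun x => x) false).map (fun i => p.2.getD i "") == fields))

-- ===== PORT B =====
-- state: (seen sequence numbers, collected (seq, column) pairs, reverse scan order)
def hasB_step (index_name : String) (st : PySem.Set Int × List (Int × String)) (row : List (String × String)) :
    PySem.Set Int × List (Int × String) :=
  if pyGetOr row "Key_name" ≠ "" ∧ seqOf row ≠ 0 ∧ pyGetOr row "Column_name" ≠ "" ∧
     pyGetOr row "Key_name" = index_name ∧ ¬ st.1.contains (seqOf row) = true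
  then (st.1.add (seqOf row), st.2 ++ [(seqOf row, pyGetOr row "Column_name")])
  else st

def has_target_index_py_alt (rows : Option (List (List (String × String)))) (index_name : String) (fields : List String) : Bool :=
  let pairs := ((rows.getD []).reverse.foldl (hasB_step index_name) (PySem.Set.empty, [])).2
  if pairs.isEmpty then false
  else ((PySem.List.sorted pairs (fun kv => kv.1) false).map (fun kv => kv.2) == fields)

-- ===== PRECONDITION & SPEC =====
-- Pre_ excludes exactly the inputs on which Python's int() raises ValueError in A (a non-empty
-- "Seq_in_index" value that does not parse as an int); B raises there too.
def Pre_has_target_index_py (rows : Option (List (List (String × String)))) (index_name : String) (fields : List String) : Prop :=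
  ∀ row ∈ rows.getD [], pyGetOr row "Seq_in_index" = "" ∨ (PySem.Int.ofStr? (pyGetOr row "Seq_in_index")).isSome
instance (rows : Option (List (List (String × String)))) (index_name : String) (fields : List String) : Decidable (Pre_has_target_index_py rows index_name fields) := by unfold Pre_has_target_index_py; infer_instance

def pvWitness_has_target_index_py : (Option (List (List (String × String)))) × String × List String :=
  (some [[("Key_name", "idx"), ("Seq_in_index", "1"), ("Column_name", "c")]], "idx", ["c"])

def Spec_has_target_index_py (rows : Option (List (List (String × String)))) (index_name : String) (fields : List String) (out : Bool) : Prop := out = has_target_index_py_alt rows index_name fields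
instance (rows : Option (List (List (String × String)))) (index_name : String) (fields : List String) (out : Bool) : Decidable (Spec_has_target_index_py rows index_name fields out) := by unfold Spec_has_target_index_py; infer_instance

-- ===== CLAIM (what is proved, stated in full; the proofs are below) =====
def Claim_equal_has_target_index_py : Prop := ∀ (rows : Option (List (List (String × String)))) (index_name : String) (fields : List String), Dom_has_target_index_py rows index_name fields → Pre_has_target_index_py rows index_name fields → Spec_has_target_index_py rows index_name fields (has_target_index_py rows index_name fields)

-- ===== LEMMAS AND PROOFS =====

-- the rows that contribute a (seq, column) assignment to the target index
def validOf (n : String) (row : List (String × String)) : Option (Int × String) :=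
  if pyGetOr row "Key_name" ≠ "" ∧ seqOf row ≠ 0 ∧ pyGetOr row "Column_name" ≠ "" ∧ pyGetOr row "Key_name" = n
  then some (seqOf row, pyGetOr row "Column_name") else none

-- first-wins accumulation (what B's seen-set loop does to its pair list)
def fwStep (acc : List (Int × String)) (p : Int × String) : List (Int × String) :=
  if p.1 ∈ acc.map Prod.fst then acc else acc ++ [p]

theorem foldB_eq_fw (n : String) (rs : List (List (String × String)))
    (s : PySem.Set Int) (ps : List (Int × String)) (h : s = ps.map Prod.fst) :
    (rs.foldl (hasB_step n) (s, ps)).2 = (rs.filterMap (validOf n)).foldl fwStep ps := by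
  induction rs generalizing s ps with
  | nil => simp
  | cons r rs ih =>
    simp only [List.foldl_cons, List.filterMap_cons]
    by_cases hv : pyGetOr r "Key_name" ≠ "" ∧ seqOf r ≠ 0 ∧ pyGetOr r "Column_name" ≠ "" ∧ pyGetOr r "Key_name" = n
    · rw [validOf, if_pos hv]
      simp only [List.foldl_cons]
      by_cases hc : PySem.Set.contains s (seqOf r) = true
      · have hstep : hasB_step n (s, ps) r = (s, ps) := by
          unfold hasB_step; rw [if_neg (by tauto)]
        have hmem : seqOf r ∈ ps.map Prod.fst := by
          have : List.contains (ps.map Prod.fst) (seqOf r) = true := by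
            simpa [PySem.Set.contains, h] using hc
          simpa using this
        rw [hstep, ih s ps h]
        have : fwStep ps (seqOf r, pyGetOr r "Column_name") = ps := by
          unfold fwStep; rw [if_pos hmem]
        rw [this]
      · have hstep : hasB_step n (s, ps) r =
            (PySem.Set.add s (seqOf r), ps ++ [(seqOf r, pyGetOr r "Column_name")]) := by
          unfold hasB_step; rw [if_pos ⟨hv.1, hv.2.1, hv.2.2.1, hv.2.2.2, hc⟩]
        have hmem : seqOf r ∉ ps.map Prod.fst := by
          intro hm
          apply hc
          have : List.contains (ps.map Prod.fst) (seqOf r) = true := by simpa using hm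
          simpa [PySem.Set.contains, h] using this
        have hfw : fwStep ps (seqOf r, pyGetOr r "Column_name") =
            ps ++ [(seqOf r, pyGetOr r "Column_name")] := by
          unfold fwStep; rw [if_neg hmem]
        subst h
        rw [hstep, hfw]
        apply ih
        unfold PySem.Set.add
        rw [if_neg]
        · simp
        · simpa [PySem.Set.contains] using hmem
    · rw [validOf, if_neg hv]
      have hstep : hasB_step n (s, ps) r = (s, ps) := by
        unfold hasB_step; rw [if_neg (by tauto)]
      rw [hstep, ih s ps h]

theorem mem_foldl_fw (ys : List (Int × String)) (acc : List (Int × String)) (k : Int) (v : String) :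
    ((k, v) ∈ ys.foldl fwStep acc ↔
      (k, v) ∈ acc ∨ (k ∉ acc.map Prod.fst ∧ ys.find? (fun p => p.1 == k) = some (k, v))) := by
  induction ys generalizing acc with
  | nil => simp
  | cons p ys ih =>
    simp only [List.foldl_cons]
    rw [ih]
    by_cases hpk : p.1 = k
    · have hb : (p.1 == k) = true := by simpa using hpk
      simp only [List.find?_cons, hb]
      by_cases hc : p.1 ∈ acc.map Prod.fst
      · have : fwStep acc p = acc := by unfold fwStep; rw [if_pos hc]
        rw [this]
        have hk : k ∈ acc.map Prod.fst := hpk ▸ hc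
        simp [hk]
      · have : fwStep acc p = acc ++ [p] := by unfold fwStep; rw [if_neg hc]
        rw [this]
        have hk : k ∉ acc.map Prod.fst := fun hm => hc (hpk ▸ hm)
        constructor
        · rintro (hm | hm)
          · rcases List.mem_append.mp hm with hm | hm
            · exact Or.inl hm
            · simp only [List.mem_singleton] at hm
              exact Or.inr ⟨hk, by rw [hm]⟩
          · exfalso
            exact hm.1 (by simp [hpk])
        · rintro (hm | ⟨_, hm⟩)
          · exact Or.inl (List.mem_append.mpr (Or.inl hm))
          · injection hm with hm
            exact Or.inl (List.mem_append.mpr (Or.inr (by simp [hm])))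
    · have hb : ¬ (p.1 == k) = true := by simpa using hpk
      rw [Bool.not_eq_true] at hb
      simp only [List.find?_cons, hb]
      by_cases hc : p.1 ∈ acc.map Prod.fst
      · have : fwStep acc p = acc := by unfold fwStep; rw [if_pos hc]
        rw [this]
      · have : fwStep acc p = acc ++ [p] := by unfold fwStep; rw [if_neg hc]
        rw [this]
        constructor
        · rintro (hm | hm)
          · rcases List.mem_append.mp hm with hm | hm
            · exact Or.inl hm
            · simp only [List.mem_singleton] at hm
              exact absurd (congrArg Prod.fst hm).symm hpk
          · refine Or.inr ⟨fun hkk => hm.1 ?_, hm.2⟩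
            simp only [List.map_append, List.mem_append]
            exact Or.inl hkk
        · rintro (hm | ⟨hm1, hm2⟩)
          · exact Or.inl (List.mem_append.mpr (Or.inl hm))
          · refine Or.inr ⟨?_, hm2⟩
            simp only [List.map_append, List.mem_append, List.map_cons, List.map_nil,
              List.mem_singleton, not_or]
            exact ⟨hm1, fun h => hpk h.symm⟩

theorem nodup_fst_foldl_fw (ys : List (Int × String)) (acc : List (Int × String))
    (h : (acc.map Prod.fst).Nodup) : (((ys.foldl fwStep acc).map Prod.fst)).Nodup := by
  induction ys generalizing acc with
  | nil => simpa using h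
  | cons p ys ih =>
    simp only [List.foldl_cons]
    apply ih
    unfold fwStep
    split
    · exact h
    · rename_i hc
      simp only [List.map_append, List.map_cons, List.map_nil]
      exact List.Nodup.append h (List.nodup_singleton _) (by simpa using hc)

-- A's target group is the plain insert-fold over the valid target assignments
theorem foldA_group (n : String) (rs : List (List (String × String)))
    (G : PySem.Dict String (PySem.Dict Int String)) :
    (rs.foldl hasA_step G).getD n PySem.Dict.empty =
      (rs.filterMap (validOf n)).foldl (fun d p => d.insert p.1 p.2) (G.getD n PySem.Dict.empty) := by
  induction rs generalizing G with
  | nil => simp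
  | cons r rs ih =>
    simp only [List.foldl_cons, List.filterMap_cons]
    by_cases hskip : pyGetOr r "Key_name" = "" ∨ seqOf r = 0 ∨ pyGetOr r "Column_name" = ""
    · have hA : hasA_step G r = G := by unfold hasA_step; rw [if_pos hskip]
      have hv : validOf n r = none := by unfold validOf; rw [if_neg (by tauto)]
      rw [hA, hv, ih]
    · simp only [not_or] at hskip
      have hA : hasA_step G r = G.modify (pyGetOr r "Key_name") PySem.Dict.empty
          (fun m => m.insert (seqOf r) (pyGetOr r "Column_name")) := by
        unfold hasA_step; rw [if_neg (by tauto)]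
      by_cases hk : pyGetOr r "Key_name" = n
      · have hv : validOf n r = some (seqOf r, pyGetOr r "Column_name") := by
          unfold validOf; rw [if_pos ⟨hskip.1, hskip.2.1, hskip.2.2, hk⟩]
        rw [hA, hv, ih]
        simp only [List.foldl_cons]
        rw [PySem.Dict.getD_modify, if_pos hk.symm, hk]
      · have hv : validOf n r = none := by unfold validOf; rw [if_neg (by tauto)]
        rw [hA, hv, ih, PySem.Dict.getD_modify, if_neg (fun hh => hk hh.symm)]

theorem get?_foldl_insert (xs : List (Int × String)) (d : PySem.Dict Int String) (k : Int) :
    (xs.foldl (fun d p => d.insert p.1 p.2) d).get? k =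
      match xs.reverse.find? (fun p => p.1 == k) with
      | some p => some p.2
      | none => d.get? k := by
  induction xs generalizing d with
  | nil => simp
  | cons p xs ih =>
    simp only [List.foldl_cons, List.reverse_cons]
    rw [ih, List.find?_append]
    cases hf : xs.reverse.find? (fun q => q.1 == k) with
    | some q => simp [Option.or]
    | none =>
      simp only [Option.or, List.find?_singleton]
      by_cases hb : (p.1 == k) = true
      · have : k = p.1 := (eq_of_beq hb).symm
        rw [if_pos hb, this, PySem.Dict.get?_insert_self]
      · rw [if_neg hb]
        exact PySem.Dict.get?_insert_of_ne d p.2 (by simpa using (fun h => hb (by simp [h])))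

theorem keys_nodup_foldA (rs : List (List (String × String)))
    (G : PySem.Dict String (PySem.Dict Int String)) (h : G.keys.Nodup) :
    (rs.foldl hasA_step G).keys.Nodup := by
  induction rs generalizing G with
  | nil => simpa using h
  | cons r rs ih =>
    simp only [List.foldl_cons]
    apply ih
    unfold hasA_step
    split
    · exact h
    · exact PySem.Dict.nodup_keys_insert _ _ _ h

theorem items_insert_ne_nil (d : PySem.Dict Int String) (k : Int) (v : String) :
    (d.insert k v).items ≠ [] := by
  rw [PySem.Dict.items_insert]
  split
  · rename_i hc
    intro hnil
    rw [List.map_eq_nil_iff] at hnil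
    simp [PySem.Dict.contains, hnil] at hc
  · simp

theorem values_good_foldA (rs : List (List (String × String)))
    (G : PySem.Dict String (PySem.Dict Int String))
    (h : ∀ p ∈ G.items, p.2.items ≠ [] ∧ p.2.keys.Nodup) :
    ∀ p ∈ (rs.foldl hasA_step G).items, p.2.items ≠ [] ∧ p.2.keys.Nodup := by
  induction rs generalizing G with
  | nil => simpa using h
  | cons r rs ih =>
    simp only [List.foldl_cons]
    apply ih
    unfold hasA_step
    split
    · exact h
    · intro p hp
      rw [PySem.Dict.modify] at hp
      rcases (PySem.Dict.mem_items_insert _ _ _ _).mp hp with hpe | hpm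
      · subst hpe
        refine ⟨items_insert_ne_nil _ _ _, PySem.Dict.nodup_keys_insert _ _ _ ?_⟩
        unfold PySem.Dict.getD PySem.Dict.get?
        cases hf : G.items.find? (fun q => q.1 == pyGetOr r "Key_name") with
        | none => simp [PySem.Dict.empty, PySem.Dict.keys]
        | some q => simpa using (h q (List.mem_of_find?_eq_some hf)).2
      · exact h p hpm.1

theorem any_eq_of_find?_none (l : List (String × PySem.Dict Int String)) (n : String)
    (f : PySem.Dict Int String → Bool)
    (h : l.find? (fun p => p.1 == n) = none) :
    (l.any fun p => p.1 == n && f p.2) = false := by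
  rw [List.any_eq_false]
  intro p hp
  have := List.find?_eq_none.mp h p hp
  simp only [Bool.and_eq_true, not_and]
  intro hb
  exact absurd hb this

theorem any_eq_of_find?_some (l : List (String × PySem.Dict Int String)) (n : String)
    (f : PySem.Dict Int String → Bool) (q : String × PySem.Dict Int String)
    (hnd : (l.map Prod.fst).Nodup)
    (h : l.find? (fun p => p.1 == n) = some q) :
    (l.any fun p => p.1 == n && f p.2) = f q.2 := by
  induction l with
  | nil => simp at h
  | cons p t ih =>
    by_cases hb : (p.1 == n) = true
    · simp only [List.find?_cons, hb] at h
      injection h with h; subst h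
      simp only [List.any_cons, hb, Bool.true_and]
      cases hf : f p.2
      · simp only [Bool.false_or]
        rw [List.any_eq_false]
        intro r hr
        simp only [List.map_cons, List.nodup_cons] at hnd
        have hne : r.1 ≠ p.1 := by
          intro he
          exact hnd.1 (he ▸ List.mem_map_of_mem hr)
        have : (r.1 == n) = false := by
          rw [beq_eq_false_iff_ne]
          intro he
          exact hne (he.trans (eq_of_beq hb).symm)
        simp [this]
      · simp
    · rw [Bool.not_eq_true] at hb
      simp only [List.find?_cons, hb] at h
      simp only [List.any_cons, hb, Bool.false_and, Bool.false_or]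
      exact ih (by simp only [List.map_cons, List.nodup_cons] at hnd; exact hnd.2) h

theorem ordered_eq_sorted_items (c : PySem.Dict Int String) (h : c.keys.Nodup) :
    (PySem.List.sorted c.keys (fun x => x) false).map (fun i => c.getD i "") =
    (PySem.List.sorted c.items (fun kv => kv.1) false).map (fun kv => kv.2) := by
  have hperm := PySem.List.sorted_perm c.items (fun kv => kv.1) false
  have hpair := PySem.List.sorted_pairwise c.items (fun kv => kv.1)
  set zs := PySem.List.sorted c.items (fun kv => kv.1) false with hzs
  have hmapperm : ((zs.map Prod.fst).Perm c.keys) := by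
    have := hperm.map Prod.fst
    unfold PySem.Dict.keys
    exact this
  have hnd : (zs.map Prod.fst).Nodup := hmapperm.nodup_iff.mpr h
  have hlt : (zs.map Prod.fst).Pairwise (· < ·) := by
    have h1 : (zs.map Prod.fst).Pairwise (· ≤ ·) :=
      List.Pairwise.map Prod.fst (fun a b hab => hab) hpair
    have := h1.and hnd
    exact this.imp (fun hab => lt_of_le_of_ne hab.1 hab.2)
  have hsortkeys : PySem.List.sorted c.keys (fun x => x) false = zs.map Prod.fst :=
    PySem.List.sorted_eq_of_perm_of_pairwise_lt _ _ _ hmapperm hlt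
  rw [hsortkeys, List.map_map]
  apply List.map_congr_left
  intro kv hkv
  have hmem : (kv.1, kv.2) ∈ c.items := by
    simpa using hperm.subset hkv
  have := PySem.Dict.get?_of_mem_items c hmem h
  simp [Function.comp, PySem.Dict.getD, this]

-- the collected pair list is a permutation of the target group's items
theorem fw_perm_items (xs : List (Int × String)) :
    (xs.reverse.foldl fwStep []).Perm
      ((xs.foldl (fun d p => d.insert p.1 p.2) PySem.Dict.empty).items) := by
  set D := xs.foldl (fun d p => d.insert p.1 p.2) PySem.Dict.empty with hD
  have hndD : D.keys.Nodup := by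
    apply PySem.Dict.nodup_keys_foldl_insert_key xs Prod.fst (fun _ p => p.2)
    simp [PySem.Dict.keys, PySem.Dict.empty]
  have hndItems : D.items.Nodup := List.Nodup.of_map Prod.fst hndD
  have hndfw : (xs.reverse.foldl fwStep []).Nodup :=
    List.Nodup.of_map Prod.fst (nodup_fst_foldl_fw xs.reverse [] (by simp))
  rw [List.perm_ext_iff_of_nodup hndfw hndItems]
  rintro ⟨k, v⟩
  rw [mem_foldl_fw]
  simp only [List.not_mem_nil, List.map_nil, not_false_iff, true_and, false_or]
  rw [← PySem.Dict.get?_eq_some_iff_mem_items D k v hndD, hD, get?_foldl_insert]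
  constructor
  · intro hf
    rw [hf]
  · intro hf
    cases hfind : xs.reverse.find? (fun p => p.1 == k) with
    | none => rw [hfind] at hf; simp [PySem.Dict.get?, PySem.Dict.empty] at hf
    | some q =>
      rw [hfind] at hf
      have hq1 : q.1 = k := by simpa using List.find?_some hfind
      have hq2 : q.2 = v := by simpa using hf
      rw [show (k, v) = q from by cases q; simp_all]

-- ===== VERDICT (by name: the statement is the Claim_ definition above) =====
theorem has_target_index_py_spec : Claim_equal_has_target_index_py := by
  intro rows n fields _ _
  unfold Spec_has_target_index_py has_target_index_py has_target_index_py_alt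
  have hB := foldB_eq_fw n (rows.getD []).reverse PySem.Set.empty [] (by simp [PySem.Set.empty])
  rw [List.filterMap_reverse] at hB
  set xs := (rows.getD []).filterMap (validOf n) with hxs
  set G := (rows.getD []).foldl hasA_step PySem.Dict.empty with hG
  have hgroup : G.getD n PySem.Dict.empty = xs.foldl (fun d p => d.insert p.1 p.2) PySem.Dict.empty := by
    rw [hG, foldA_group]
    rfl
  have hperm := fw_perm_items xs
  have hnd : G.keys.Nodup := keys_nodup_foldA _ _ (by simp [PySem.Dict.keys, PySem.Dict.empty])
  have hvals := values_good_foldA (rows.getD []) PySem.Dict.empty (by simp [PySem.Dict.empty])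
  rw [hB]
  cases hfind : G.items.find? (fun p => p.1 == n) with
  | none =>
    rw [any_eq_of_find?_none G.items n
      (fun c => ((PySem.List.sorted c.keys (fun x => x) false).map (fun i => c.getD i "") == fields)) hfind]
    have hempty : G.getD n PySem.Dict.empty = PySem.Dict.empty := by
      simp [PySem.Dict.getD, PySem.Dict.get?, hfind]
    have hnil : (xs.foldl (fun d p => d.insert p.1 p.2) PySem.Dict.empty).items = [] := by
      rw [← hgroup, hempty]; rfl
    have : xs.reverse.foldl fwStep [] = [] := by
      rw [hnil] at hperm
      exact List.Perm.eq_nil hperm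
    rw [this]
    simp
  | some q =>
    rw [any_eq_of_find?_some G.items n
      (fun c => ((PySem.List.sorted c.keys (fun x => x) false).map (fun i => c.getD i "") == fields)) q hnd hfind]
    have hq := hvals q (List.mem_of_find?_eq_some hfind)
    have hcols : G.getD n PySem.Dict.empty = q.2 := by
      simp [PySem.Dict.getD, PySem.Dict.get?, hfind]
    rw [hcols] at hgroup
    rw [← hgroup] at hperm
    have hfwne : xs.reverse.foldl fwStep [] ≠ [] := by
      intro hnil
      rw [hnil] at hperm
      exact hq.1 hperm.symm.eq_nil
    rw [if_neg (by simpa [List.isEmpty_iff] using hfwne)]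
    rw [ordered_eq_sorted_items q.2 hq.2]
    have hsorted : PySem.List.sorted (xs.reverse.foldl fwStep []) (fun kv => kv.1) false =
        PySem.List.sorted q.2.items (fun kv => kv.1) false := by
      have hperm2 : (PySem.List.sorted q.2.items (fun kv => kv.1) false).Perm
          (xs.reverse.foldl fwStep []) :=
        (PySem.List.sorted_perm _ _ _).trans hperm.symm
      have hpair := PySem.List.sorted_pairwise q.2.items (fun kv => kv.1)
      have hndz : ((PySem.List.sorted q.2.items (fun kv => kv.1) false).map Prod.fst).Nodup := by
        have := ((PySem.List.sorted_perm q.2.items (fun kv => kv.1) false).map Prod.fst).nodup_iff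
        exact this.mpr hq.2
      have hlt : (PySem.List.sorted q.2.items (fun kv => kv.1) false).Pairwise
          (fun a b => a.1 < b.1) := by
        have h2 : (PySem.List.sorted q.2.items (fun kv => kv.1) false).Pairwise
            (fun a b => a.1 ≠ b.1) := by
          exact List.pairwise_map.mp hndz
        exact (hpair.and h2).imp (fun hab => lt_of_le_of_ne hab.1 hab.2)
      exact PySem.List.sorted_eq_of_perm_of_pairwise_lt _ _ _ hperm2 hlt
    rw [hsorted]
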